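-- pv_equiv track=rewrite | github.com/asadabbas-dev/web-inventory-scrapper | main.py | _is_main_category_link
-- ===== SOURCE A (Python) =====
-- def _is_main_category_link(href, text):
--     """Check if link is a main category"""
--     if not href or not text:
--         return False
--
--     # Look for category indicators in URL
--     category_indicators = ['routers', 'switches', 'firewalls', 'wireless', 'servers', 'storages']
--     href_lower = href.lower()
--
--     if any(indicator in href_lower for indicator in category_indicators):
--         return True
--
--     # Look for category indicators in text
--     text_lower = text.lower()
--     if any(indicator in text_lower for indicator in category_indicators):
--         return True
--
--     return False
-- ===== SOURCE B (Python) =====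
-- def _is_main_category_link(href, text):
--     """Check if link is a main category"""
--     if not href or not text:
--         return False
--     kws = ('routers', 'switches', 'firewalls', 'wireless', 'servers', 'storages')
--
--     def search(s):
--         s = s.lower()
--         # single left-to-right scan: at each position try every alternative
--         return any(s.startswith(k, i) for i in range(len(s) + 1) for k in kws)
--
--     return search(href) or search(text)
-- ===== Notes on version B (the rewrite author's own statement) =====
-- stated objective: alternative
-- what changed: Replaces A's per-indicator substring-containment loop (one 'in' search per keyword per string) by a single left-to-right position scan per string that tries every alternative as a prefix at each position (a naive regex-alternation search), keeping the same falsy guard.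
import Mathlib
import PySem

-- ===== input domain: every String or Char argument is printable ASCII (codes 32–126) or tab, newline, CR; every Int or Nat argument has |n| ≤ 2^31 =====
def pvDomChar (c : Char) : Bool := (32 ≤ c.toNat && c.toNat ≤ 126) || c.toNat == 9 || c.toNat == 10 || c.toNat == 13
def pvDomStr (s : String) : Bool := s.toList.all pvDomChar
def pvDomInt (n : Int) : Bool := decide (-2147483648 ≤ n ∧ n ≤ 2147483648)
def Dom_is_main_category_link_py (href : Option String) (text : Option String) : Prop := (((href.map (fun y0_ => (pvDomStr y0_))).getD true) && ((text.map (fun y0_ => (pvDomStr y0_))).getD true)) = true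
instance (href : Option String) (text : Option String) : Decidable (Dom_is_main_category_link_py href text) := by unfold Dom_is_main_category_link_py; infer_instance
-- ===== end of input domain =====

-- ===== PORT A =====
-- B replaces A's per-indicator substring-containment loop by a single position scan
-- trying every alternative as a prefix at each position (alternative, same cost).
-- A-side helper: Python truthiness of an optional string ('not href')
def pyStrFalsy (s : Option String) : Bool :=
  match s with
  | none => true
  | some s => s.toList.isEmpty

def catIndicators : List String :=
  ["routers", "switches", "firewalls", "wireless", "servers", "storages"]

def is_main_category_link_py (href : Option String) (text : Option String) : Bool :=
  if pyStrFalsy href || pyStrFalsy text then false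
  else
    let h := href.getD ""
    let t := text.getD ""
    let href_lower := PySem.Str.lower h
    if catIndicators.any (fun ind => PySem.Str.isIn ind href_lower) then true
    else
      let text_lower := PySem.Str.lower t
      if catIndicators.any (fun ind => PySem.Str.isIn ind text_lower) then true
      else false

-- ===== PORT B =====
-- B-side helpers: the alternatives, a prefix test at one position, and the scan
def reAlternatives : List (List Char) :=
  ["routers", "switches", "firewalls", "wireless", "servers", "storages"].map String.toList

def reMatchAt (s : List Char) : Bool :=
  reAlternatives.any (fun k => k.isPrefixOf s)

def reSearch : List Char → Bool
  | [] => reMatchAt []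
  | c :: t => reMatchAt (c :: t) || reSearch t

def is_main_category_link_py_alt (href : Option String) (text : Option String) : Bool :=
  match href, text with
  | some h, some t =>
    if h.toList.isEmpty || t.toList.isEmpty then false
    else reSearch (PySem.Chars.lower h.toList) || reSearch (PySem.Chars.lower t.toList)
  | _, _ => false

-- ===== PRECONDITION & SPEC =====
def Spec_is_main_category_link_py (href : Option String) (text : Option String) (out : Bool) : Prop := out = is_main_category_link_py_alt href text
instance (href : Option String) (text : Option String) (out : Bool) : Decidable (Spec_is_main_category_link_py href text out) := by unfold Spec_is_main_category_link_py; infer_instance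

-- ===== CLAIM (what is proved, stated in full; the proofs are below) =====
def Claim_equal_is_main_category_link_py : Prop := ∀ (href : Option String) (text : Option String), Dom_is_main_category_link_py href text → Spec_is_main_category_link_py href text (is_main_category_link_py href text)

-- ===== LEMMAS AND PROOFS =====\n
lemma reSearch_iff (s : List Char) :
    reSearch s = true ↔ ∃ k ∈ reAlternatives, k <:+: s := by
  induction s with
  | nil =>
    simp [reSearch, reMatchAt, reAlternatives]
  | cons c t ih =>
    simp only [reSearch, Bool.or_eq_true, ih, reMatchAt, List.any_eq_true,
      List.isPrefixOf_iff_prefix, List.infix_cons_iff]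
    constructor
    · rintro (⟨k, hk, hp⟩ | ⟨k, hk, hi⟩)
      · exact ⟨k, hk, Or.inl hp⟩
      · exact ⟨k, hk, Or.inr hi⟩
    · rintro ⟨k, hk, hp | hi⟩
      · exact Or.inl ⟨k, hk, hp⟩
      · exact Or.inr ⟨k, hk, hi⟩

lemma reSearch_eq_any (s : String) :
    reSearch (PySem.Chars.lower s.toList)
      = catIndicators.any (fun ind => PySem.Str.isIn ind (PySem.Str.lower s)) := by
  rw [Bool.eq_iff_iff, reSearch_iff, List.any_eq_true]
  constructor
  · rintro ⟨k, hk, hi⟩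
    simp only [reAlternatives, List.mem_map] at hk
    rcases hk with ⟨ind, hind, rfl⟩
    refine ⟨ind, hind, ?_⟩
    rw [PySem.Str.isIn_iff_infix]
    simpa [PySem.Str.toList_lower] using hi
  · rintro ⟨ind, hind, hin⟩
    refine ⟨ind.toList, ?_, ?_⟩
    · simp only [reAlternatives, List.mem_map]
      exact ⟨ind, hind, rfl⟩
    · have := (PySem.Str.isIn_iff_infix ind (PySem.Str.lower s)).mp hin
      simpa [PySem.Str.toList_lower] using this

-- ===== VERDICT (by name: the statement is the Claim_ definition above) =====
theorem is_main_category_link_py_spec : Claim_equal_is_main_category_link_py := by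
  intro href text _
  unfold Spec_is_main_category_link_py
  unfold is_main_category_link_py is_main_category_link_py_alt
  cases href with
  | none => simp [pyStrFalsy]
  | some h =>
    cases text with
    | none => simp [pyStrFalsy]
    | some t =>
      simp only [pyStrFalsy, Option.getD_some]
      split_ifs with hg h1 h2
      · rfl
      · rw [reSearch_eq_any h, reSearch_eq_any t, h1, Bool.true_or]
      · rw [Bool.not_eq_true] at h1
        rw [reSearch_eq_any h, reSearch_eq_any t, h1, h2, Bool.false_or]
      · rw [Bool.not_eq_true] at h1 h2
        rw [reSearch_eq_any h, reSearch_eq_any t, h1, h2, Bool.false_or]
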